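-- pv_equiv track=rewrite | github.com/jupiter6676/OSP_Final | crawl.py | clean_word_list
-- ===== SOURCE A (Python) =====
-- def clean_word_list(input_list):
--
-- 	output_list = []
--
-- 	for word in input_list:
--
-- 		symbols = """!•@#$%^&*()_-+={[}]|\;:"‘'·<>?/., """
--
-- 		for i in range(len((symbols))):
-- 			word = word.replace(symbols[i], '')
--
-- 		if len(word) > 0:
-- 			output_list.append(word)
--
-- 	return output_list
-- ===== SOURCE B (Python) =====
-- SYMBOLS = set("""!•@#$%^&*()_-+={[}]|\;:"‘'·<>?/., """)
--
--
-- def clean_word_list(input_list):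
--     output_list = []
--     for word in input_list:
--         cleaned = ''.join(c for c in word if c not in SYMBOLS)
--         if cleaned:
--             output_list.append(cleaned)
--     return output_list
-- ===== Notes on version B (the rewrite author's own statement) =====
-- stated objective: faster
-- what changed: A rewrites each word 34 times, once per symbol via str.replace; B builds the symbol set once and cleans each word in a single character-level membership-filter pass.
import Mathlib
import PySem

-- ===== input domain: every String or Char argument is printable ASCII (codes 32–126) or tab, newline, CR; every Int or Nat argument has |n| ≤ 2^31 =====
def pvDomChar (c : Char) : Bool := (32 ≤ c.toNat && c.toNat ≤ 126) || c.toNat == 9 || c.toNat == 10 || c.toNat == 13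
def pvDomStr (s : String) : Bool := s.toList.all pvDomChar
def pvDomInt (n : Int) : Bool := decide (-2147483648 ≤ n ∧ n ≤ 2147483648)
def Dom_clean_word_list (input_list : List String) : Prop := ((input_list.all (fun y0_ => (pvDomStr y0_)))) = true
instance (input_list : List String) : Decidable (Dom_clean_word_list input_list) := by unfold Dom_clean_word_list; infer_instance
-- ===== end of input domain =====

-- B removes each word's symbol characters in one membership-filtered pass over the word,
-- instead of A's 34 successive str.replace rewrites; same return value on every input.

-- ===== PORT A =====
def clean_word_list (input_list : List String) : List String :=
  input_list.foldl (fun output_list word =>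
    let symbols : String := "!•@#$%^&*()_-+={[}]|\\;:\"‘'·<>?/., "
    let word := (PySem.List.pyRange 0 (PySem.Str.len symbols) 1).foldl
      (fun w i =>
        match PySem.Str.pyGet? symbols i with   -- i is always in range here (i < len(symbols))
        | some c => PySem.Str.replace w (String.ofList [c]) ""
        | none => w) word
    if PySem.Str.len word > 0 then output_list ++ [word] else output_list) []

-- ===== PORT B =====
def pvSymbolSet : PySem.Set Char :=
  PySem.Set.ofList ("!•@#$%^&*()_-+={[}]|\\;:\"‘'·<>?/., " : String).toList

def clean_word_list_alt (input_list : List String) : List String :=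
  input_list.foldl (fun output_list word =>
    let cleaned := String.ofList (word.toList.filter (fun c => !(pvSymbolSet.contains c)))
    if cleaned ≠ "" then output_list ++ [cleaned] else output_list) []

-- ===== PRECONDITION & SPEC =====
def Spec_clean_word_list (input_list : List String) (out : List String) : Prop := out = clean_word_list_alt input_list
instance (input_list : List String) (out : List String) : Decidable (Spec_clean_word_list input_list out) := by unfold Spec_clean_word_list; infer_instance

-- ===== CLAIM (what is proved, stated in full; the proofs are below) =====
def Claim_equal_clean_word_list : Prop := ∀ (input_list : List String), Dom_clean_word_list input_list → Spec_clean_word_list input_list (clean_word_list input_list)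

-- ===== LEMMAS AND PROOFS =====

-- str.replace with a one-character pattern and empty replacement is a character filter
theorem replace_go_single (c : Char) :
    ∀ (w : List Char) (fuel : Nat) (acc : List Char), w.length ≤ fuel →
      PySem.Chars.replace.go [c] [] fuel w acc = acc.reverse ++ w.filter (· ≠ c) := by
  intro w
  induction w with
  | nil =>
      intro fuel acc _
      cases fuel <;> simp [PySem.Chars.replace.go]
  | cons a t ih =>
      intro fuel acc h
      cases fuel with
      | zero => simp at h
      | succ f =>
          by_cases hac : c = a
          · subst hac
            rw [show PySem.Chars.replace.go [c] [] (f+1) (c :: t) acc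
                  = PySem.Chars.replace.go [c] [] f t acc by
                  simp [PySem.Chars.replace.go, List.isPrefixOf]]
            rw [ih f acc (by simpa using Nat.le_of_succ_le_succ h)]
            simp
          · rw [show PySem.Chars.replace.go [c] [] (f+1) (a :: t) acc
                  = PySem.Chars.replace.go [c] [] f t (a :: acc) by
                  simp [PySem.Chars.replace.go, List.isPrefixOf,
                        (by simpa using (beq_eq_false_iff_ne (a := c) (b := a)).2 hac : (c == a) = false)]]
            rw [ih f (a :: acc) (by simpa using Nat.le_of_succ_le_succ h)]
            simp [Ne.symm hac]

theorem replace_single (c : Char) (w : List Char) :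
    PySem.Chars.replace w [c] [] = w.filter (· ≠ c) := by
  rw [PySem.Chars.replace]
  simp [replace_go_single c w w.length [] (le_refl _)]

-- successive single-character filters are one membership filter
theorem foldl_filter (cs : List Char) :
    ∀ w : List Char, cs.foldl (fun w c => w.filter (· ≠ c)) w
      = w.filter (fun ch => !(cs.contains ch)) := by
  induction cs with
  | nil => intro w; simp
  | cons c cs ih =>
      intro w
      simp only [List.foldl_cons, ih, List.filter_filter]
      apply List.filter_congr
      intro ch _
      by_cases h : ch = c <;> simp [h]

-- the indexed inner loop of A is the foldl over the symbol characters
theorem inner_loop_eq (cs : List Char) (f : List Char → Char → List Char) :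
    ∀ (n k : Nat) (w : List Char), cs.length - k = n → k ≤ cs.length →
      (PySem.List.pyRange (k : Int) (cs.length : Int) 1).foldl
        (fun w i =>
          match PySem.List.pyGet? cs i with
          | some c => f w c
          | none => w) w
      = (cs.drop k).foldl f w := by
  intro n
  induction n with
  | zero =>
      intro k w hn hk
      have hk' : k = cs.length := by omega
      subst hk'
      rw [PySem.List.pyRange_one_eq_nil (le_refl _)]
      simp
  | succ n ih =>
      intro k w hn hk
      have hlt : k < cs.length := by omega
      rw [PySem.List.pyRange_one_cons (by exact_mod_cast hlt)]
      rw [List.drop_eq_getElem_cons hlt]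
      simp only [List.foldl_cons, PySem.List.pyGet?_natCast, List.getElem?_eq_getElem hlt]
      have : ((k : Int) + 1) = ((k + 1 : Nat) : Int) := by push_cast; ring
      rw [this, ih (k+1) (f w cs[k]) (by omega) (by omega)]

-- lift a list-level fold step to a String-level fold
theorem foldl_str (L : List Int) (g : String → Int → String) (g' : List Char → Int → List Char)
    (hg : ∀ s i, (g s i).toList = g' s.toList i) :
    ∀ w : String, L.foldl g w = String.ofList (L.foldl g' w.toList) := by
  induction L with
  | nil => intro w; simp
  | cons i L ih =>
      intro w
      simp only [List.foldl_cons, ih (g w i), hg w i]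

theorem contains_ofList (cs : List Char) (ch : Char) :
    (PySem.Set.ofList cs).contains ch = cs.contains ch := by
  rcases hc : cs.contains ch with _|_
  · rcases h2 : (PySem.Set.ofList cs).contains ch with _|_
    · rfl
    · exfalso
      have := (PySem.Set.mem_ofList cs ch).1 (by simpa [PySem.Set.contains] using h2)
      simp at hc; exact hc this
  · have := (PySem.Set.mem_ofList cs ch).2 (by simpa [List.contains_iff_mem] using hc)
    simpa [PySem.Set.contains, List.contains_iff_mem] using this

-- per word: A's inner replace loop produces exactly B's cleaned word
theorem word_clean_gen (S w : String) :
    (PySem.List.pyRange 0 (PySem.Str.len S) 1).foldl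
      (fun w i =>
        match PySem.Str.pyGet? S i with
        | some c => PySem.Str.replace w (String.ofList [c]) ""
        | none => w) w
    = String.ofList (w.toList.filter (fun c => !((PySem.Set.ofList S.toList).contains c))) := by
  have hlen : PySem.Str.len S = ((S.toList.length : Nat) : Int) := by simp [PySem.Str.len]
  rw [hlen]
  rw [foldl_str _ _
      (fun s i =>
        match PySem.List.pyGet? S.toList i with
        | some c => PySem.Chars.replace s [c] []
        | none => s)
      (by
        intro s i
        have hb : PySem.Str.pyGet? S i = PySem.List.pyGet? S.toList i := by simp
        rw [hb]
        cases h : PySem.List.pyGet? S.toList i with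
        | none => simp only [h]
        | some c => simp only [h, PySem.Str.toList_replace, String.toList_ofList]; simp)]
  rw [show ((0 : Int)) = ((0 : Nat) : Int) from rfl]
  rw [inner_loop_eq S.toList _ S.toList.length 0 w.toList (by omega) (by omega)]
  simp only [List.drop_zero]
  congr 1
  rw [show (fun (w : List Char) (c : Char) => PySem.Chars.replace w [c] [])
        = (fun (w : List Char) (c : Char) => w.filter (· ≠ c)) by
      funext w c; exact replace_single c w]
  rw [foldl_filter _ w.toList]
  apply List.filter_congr
  intro ch _
  rw [contains_ofList]

-- ===== VERDICT (by name: the statement is the Claim_ definition above) =====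
theorem clean_word_list_spec : Claim_equal_clean_word_list := by
  intro input_list _
  unfold Spec_clean_word_list clean_word_list clean_word_list_alt
  rw [show (fun (output_list : List String) (word : String) =>
        let symbols : String := "!•@#$%^&*()_-+={[}]|\\;:\"‘'·<>?/., "
        let word := (PySem.List.pyRange 0 (PySem.Str.len symbols) 1).foldl
          (fun w i =>
            match PySem.Str.pyGet? symbols i with
            | some c => PySem.Str.replace w (String.ofList [c]) ""
            | none => w) word
        if PySem.Str.len word > 0 then output_list ++ [word] else output_list)
      = (fun (output_list : List String) (word : String) =>
        let cleaned := String.ofList (word.toList.filter (fun c => !(pvSymbolSet.contains c)))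
        if cleaned ≠ "" then output_list ++ [cleaned] else output_list) by
    funext output_list word
    simp only [word_clean_gen, pvSymbolSet]
    generalize (String.ofList (word.toList.filter
      (fun c => !((PySem.Set.ofList ("!•@#$%^&*()_-+={[}]|\\;:\"‘'·<>?/., " : String).toList).contains c)))) = t
    rcases eq_or_ne t "" with h|h
    · subst h; simp [PySem.Str.len]
    · simp [h]]
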